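-- pv_equiv track=rewrite | github.com/rajiv256/magellan | backend/generate_oligo_sequences.py | check_symmetry_constraints
-- ===== SOURCE A (Python) =====
-- def check_symmetry_constraints(sequence: str) -> bool:
--     """Check for problematic symmetry patterns"""
--     seq = sequence.upper()
--     length = len(seq)
--
--     # 1. Avoid perfect reverse complement of itself (palindromic)
--     complement_map = {'A': 'T', 'T': 'A', 'G': 'C', 'C': 'G'}
--     reverse_comp = ''.join(complement_map.get(base, base) for base in seq[::-1])
--     if seq == reverse_comp:
--         return False
--
--     # 2. Avoid sequences that are reverse of themselves
--     if seq == seq[::-1]: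
--         return False
--
--     # 3. Check for internal symmetry (avoid strong secondary structures)
--     if length >= 12:
--         # Check if first half is reverse complement of second half
--         mid = length // 2
--         first_half = seq[:mid]
--         second_half = seq[mid:mid * 2]
--         second_half_rc = ''.join(complement_map.get(base, base) for base in second_half[::-1])
--
--         if first_half == second_half_rc:
--             return False
--
--     # 4. Avoid sequences with strong internal complementarity
--     if length >= 8:
--         for i in range(length - 3):
--             for j in range(i + 4, length):
--                 if j - i >= 4:  # At least 4 bp apart
--                     subseq1 = seq[i:i + 4]
--                     subseq2 = seq[j:j + 4] if j + 4 <= length else seq[j:]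
--                     if len(subseq2) >= 4:
--                         subseq2_rc = ''.join(complement_map.get(base, base) for base in subseq2[::-1])
--                         if subseq1 == subseq2_rc:
--                             return False
--
--     return True
-- ===== SOURCE B (Python) =====
-- def check_symmetry_constraints(sequence: str) -> bool:
--     """Check for problematic symmetry patterns (single-pass 4-mer index)"""
--     complement_map = {'A': 'T', 'T': 'A', 'G': 'C', 'C': 'G'}
--
--     def rc(s):
--         return ''.join(complement_map.get(base, base) for base in reversed(s))
--
--     seq = sequence.upper()
--     n = len(seq)
--
--     if seq == rc(seq):
--         return False
--     if seq == seq[::-1]: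
--         return False
--     if n >= 12:
--         mid = n // 2
--         if seq[:mid] == rc(seq[mid:mid * 2]):
--             return False
--
--     # Index: reverse-complement of each 4-mer -> its LAST start position.
--     last = {}
--     for j in range(n - 3):
--         last[rc(seq[j:j + 4])] = j
--     # A pair (i, j) with seq[i:i+4] == rc(seq[j:j+4]) and j >= i + 4 exists
--     # iff the last occurrence stored under seq[i:i+4] is >= i + 4.
--     for i in range(n - 3):
--         if last.get(seq[i:i + 4], -1) >= i + 4:
--             return False
--     return True
-- ===== Notes on version B (the rewrite author's own statement) =====
-- stated objective: faster
-- what changed: Step 4's nested scan over all O(n^2) position pairs is replaced by one pass that indexes the reverse complement of every 4-mer by its last start position in a dict, plus one pass that looks each 4-mer up and compares the stored position with i+4.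
import Mathlib
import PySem

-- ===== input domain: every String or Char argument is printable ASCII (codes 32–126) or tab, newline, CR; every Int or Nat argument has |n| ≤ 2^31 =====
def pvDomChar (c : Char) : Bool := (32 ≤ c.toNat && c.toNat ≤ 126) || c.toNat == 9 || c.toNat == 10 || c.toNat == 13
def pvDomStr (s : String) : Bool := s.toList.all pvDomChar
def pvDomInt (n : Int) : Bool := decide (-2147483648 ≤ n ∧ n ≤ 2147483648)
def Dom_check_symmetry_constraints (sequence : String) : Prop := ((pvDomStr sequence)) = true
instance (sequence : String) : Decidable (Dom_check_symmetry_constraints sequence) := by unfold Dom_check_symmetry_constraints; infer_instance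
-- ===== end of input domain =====

-- ===== PORT A =====
-- B replaces A's quadratic pair scan (step 4) by a single-pass 4-mer index; return value proved equal.
-- shared helper: complement_map.get(base, base) of the Python dict literal
def pvCompl (c : Char) : Char :=
  if c = 'A' then 'T' else if c = 'T' then 'A' else if c = 'G' then 'C' else if c = 'C' then 'G' else c

-- ''.join(complement_map.get(base, base) for base in s[::-1])  (reverse complement; s[::-1] is reverse, PySem.List.slice?_none_none_neg_one)
def pvRC (s : List Char) : List Char := s.reverse.map pvCompl

-- step 3 of both Pythons (identical in A and B): internal half symmetry
def pvStep3 (seq : List Char) : Bool :=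
  let length := PySem.List.len seq
  if length ≥ 12 then
    let mid := PySem.Int.floordiv length 2
    let first_half := PySem.List.slice seq none (some mid)
    let second_half := PySem.List.slice seq (some mid) (some (mid * 2))
    decide (first_half = pvRC second_half)
  else false

-- A's step 4: nested scan over all pairs (i, j); the early 'return False' is List.any
def pvStep4A (seq : List Char) : Bool :=
  let length := PySem.List.len seq
  if length ≥ 8 then
    (PySem.List.pyRange 0 (length - 3) 1).any fun i =>
      (PySem.List.pyRange (i + 4) length 1).any fun j =>
        if j - i ≥ 4 then
          let subseq1 := PySem.List.slice seq (some i) (some (i + 4))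
          let subseq2 := if j + 4 ≤ length then PySem.List.slice seq (some j) (some (j + 4))
                         else PySem.List.slice seq (some j) none
          if PySem.List.len subseq2 ≥ 4 then decide (subseq1 = pvRC subseq2) else false
        else false
  else false

def check_symmetry_constraints (sequence : String) : Bool :=
  let seq := PySem.Chars.upper sequence.toList
  if seq = pvRC seq then false
  else if seq = seq.reverse then false
  else if pvStep3 seq then false
  else if pvStep4A seq then false
  else true

-- ===== PORT B =====
-- B's step 4: one pass builds 'last' (reverse-complement of each 4-mer -> last start
-- position), then one pass looks each 4-mer up and compares the stored position with i + 4
def pvStep4B (seq : List Char) : Bool :=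
  let n := PySem.List.len seq
  let last := (PySem.List.pyRange 0 (n - 3) 1).foldl
      (fun d j => d.insert (pvRC (PySem.List.slice seq (some j) (some (j + 4)))) j)
      (PySem.Dict.empty : PySem.Dict (List Char) Int)
  (PySem.List.pyRange 0 (n - 3) 1).any fun i =>
    decide (last.getD (PySem.List.slice seq (some i) (some (i + 4))) (-1) ≥ i + 4)

def check_symmetry_constraints_alt (sequence : String) : Bool :=
  let seq := PySem.Chars.upper sequence.toList
  if seq = pvRC seq then false
  else if seq = seq.reverse then false
  else if pvStep3 seq then false
  else if pvStep4B seq then false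
  else true

-- ===== PRECONDITION & SPEC =====
def Spec_check_symmetry_constraints (sequence : String) (out : Bool) : Prop := out = check_symmetry_constraints_alt sequence
instance (sequence : String) (out : Bool) : Decidable (Spec_check_symmetry_constraints sequence out) := by unfold Spec_check_symmetry_constraints; infer_instance

-- ===== CLAIM (what is proved, stated in full; the proofs are below) =====
def Claim_equal_check_symmetry_constraints : Prop := ∀ (sequence : String), Dom_check_symmetry_constraints sequence → Spec_check_symmetry_constraints sequence (check_symmetry_constraints sequence)

-- ===== LEMMAS AND PROOFS =====

-- the pair condition both step-4 loops detect
def pvHit (seq : List Char) (i j : Int) : Prop :=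
  PySem.List.slice seq (some i) (some (i + 4)) =
    pvRC (PySem.List.slice seq (some j) (some (j + 4)))

lemma pvLen4 (seq : List Char) {j : Int} (h0 : 0 ≤ j) (h4 : j + 4 ≤ (seq.length : Int)) :
    (PySem.List.slice seq (some j) (some (j + 4))).length = 4 := by
  rw [PySem.List.length_slice]
  simp only [PySem.List.clampIdx]
  split_ifs <;> omega

lemma pvStep4A_iff (seq : List Char) :
    pvStep4A seq = true ↔
      ∃ i j : Int, 0 ≤ i ∧ i < (seq.length : Int) - 3 ∧ i + 4 ≤ j ∧
        j + 4 ≤ (seq.length : Int) ∧ pvHit seq i j := by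
  unfold pvStep4A
  simp only [PySem.List.len_eq, ge_iff_le]
  by_cases h8 : (8 : Int) ≤ (seq.length : Int)
  · rw [if_pos h8]
    simp only [List.any_eq_true, PySem.List.mem_pyRange_one]
    constructor
    · rintro ⟨i, ⟨hi0, hi1⟩, j, ⟨hj0, hj1⟩, hbody⟩
      rw [if_pos (show (4 : Int) ≤ j - i by omega)] at hbody
      split_ifs at hbody with hc hlen1 hlen2
      · have h' := of_decide_eq_true hbody
        exact ⟨i, j, hi0, hi1, hj0, hc, h'⟩
      · -- j + 4 > length: subseq2 = seq[j:] has fewer than 4 chars, contradicting the len test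
        rw [PySem.List.slice_from seq (by omega)] at hlen2
        simp only [List.length_drop] at hlen2
        omega
    · rintro ⟨i, j, h1, h2, h3, h4, h5⟩
      refine ⟨i, ⟨h1, h2⟩, j, ⟨h3, by omega⟩, ?_⟩
      simp only [eq_true (show (4 : Int) ≤ j - i by omega), eq_true h4, if_true,
        pvLen4 seq (by omega) h4]
      norm_num
      exact h5
  · rw [if_neg h8]
    constructor
    · intro h; exact absurd h (by simp)
    · rintro ⟨i, j, h1, h2, h3, h4, -⟩; omega

lemma pvLastD (f : Int → List Char) (m : Nat) (k : List Char) (t : Int) (ht : 0 ≤ t) :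
    (((PySem.List.pyRange 0 m 1).foldl (fun d j => d.insert (f j) j)
        (PySem.Dict.empty : PySem.Dict (List Char) Int)).getD k (-1) ≥ t)
    ↔ ∃ j : Int, 0 ≤ j ∧ j < (m : Int) ∧ f j = k ∧ t ≤ j := by
  induction m with
  | zero =>
    rw [PySem.List.pyRange_one_eq_nil (by norm_num)]
    simp only [List.foldl_nil, PySem.Dict.getD_empty]
    constructor
    · intro h; omega
    · rintro ⟨j, h1, h2, _, _⟩; omega
  | succ m ih =>
    have hc : ((m + 1 : Nat) : Int) = (m : Int) + 1 := by omega
    rw [hc, PySem.List.pyRange_one_succ_right (by positivity), List.foldl_append]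
    simp only [List.foldl_cons, List.foldl_nil, PySem.Dict.getD_insert]
    by_cases hk : k = f (m : Int)
    · simp only [if_pos hk]
      constructor
      · intro h; exact ⟨m, by positivity, by omega, hk.symm, h⟩
      · rintro ⟨j, h1, h2, h3, h4⟩; omega
    · simp only [if_neg hk]
      rw [ih]
      constructor
      · rintro ⟨j, h1, h2, h3, h4⟩; exact ⟨j, h1, by omega, h3, h4⟩
      · rintro ⟨j, h1, h2, h3, h4⟩
        refine ⟨j, h1, ?_, h3, h4⟩
        rcases lt_or_eq_of_le (by omega : j ≤ (m : Int)) with h | h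
        · exact h
        · exact absurd (h ▸ h3).symm hk

lemma pvStep4B_iff (seq : List Char) :
    pvStep4B seq = true ↔
      ∃ i j : Int, 0 ≤ i ∧ i < (seq.length : Int) - 3 ∧ i + 4 ≤ j ∧
        j + 4 ≤ (seq.length : Int) ∧ pvHit seq i j := by
  unfold pvStep4B
  simp only [PySem.List.len_eq, List.any_eq_true, PySem.List.mem_pyRange_one,
    decide_eq_true_eq]
  by_cases hL : (seq.length : Int) ≤ 3
  · constructor
    · rintro ⟨i, hi, -⟩; omega
    · rintro ⟨i, j, h1, h2, -⟩; omega
  · have hm : (seq.length : Int) - 3 = ((seq.length - 3 : Nat) : Int) := by omega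
    rw [hm]
    constructor
    · rintro ⟨i, hi, hgd⟩
      rw [pvLastD _ _ _ _ (by omega)] at hgd
      obtain ⟨j, hj0, hjm, hjk, hij⟩ := hgd
      exact ⟨i, j, hi.1, by omega, hij, by omega, hjk.symm⟩
      
    · rintro ⟨i, j, h1, h2, h3, h4, h5⟩
      refine ⟨i, ⟨by omega, by omega⟩, ?_⟩
      · rw [pvLastD _ _ _ _ (by omega)]
        exact ⟨j, by omega, by omega, h5.symm, h3⟩

lemma pvStep4_eq (seq : List Char) : pvStep4A seq = pvStep4B seq := by
  rw [Bool.eq_iff_iff, pvStep4A_iff, pvStep4B_iff]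

-- ===== VERDICT (by name: the statement is the Claim_ definition above) =====
theorem check_symmetry_constraints_spec : Claim_equal_check_symmetry_constraints := by
  intro s _
  unfold Spec_check_symmetry_constraints
  simp only [check_symmetry_constraints, check_symmetry_constraints_alt]
  rw [pvStep4_eq]
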